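-- pv_equiv track=rewrite | github.com/felipeoes/IA | gerador_amostras.py | gerar_k_folds
-- ===== SOURCE A (Python) =====
-- from itertools import cycle, islice
--
-- def gerar_k_folds(dataset):
--     tamanho = len(dataset)
--     folds = []
--
--     # Iremos gerar um K-Fold de (K = 3)
--     # De forma que:
--     # Primeiro Fold: [1, 2] treinamento, 3 validação
--     # Segundo Fold:  [2, 3] treinamento, 1 validação
--     # Terceiro Fold: [3, 1] treinamento, 2 validação
--     for indice in range(tamanho):
--         dataset_em_ciclos = cycle(dataset)
--
--         # Pega 2/3 do dataset para treinamento
--         treinamento = list(islice(dataset_em_ciclos, indice, indice + 2))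
--
--         # Pega 1/3 do dataset para validacao
--         validacao = list(islice(dataset_em_ciclos, 0, 1))
--
--         folds.append([ treinamento, validacao ])
--
--     return folds
-- ===== SOURCE B (Python) =====
-- def gerar_k_folds(dataset):
--     n = len(dataset)
--     return [[[dataset[i % n], dataset[(i + 1) % n]],
--              [dataset[(i + 2) % n]]] for i in range(n)]
-- ===== Notes on version B (the rewrite author's own statement) =====
-- stated objective: faster
-- what changed: Replaced per-fold re-construction of a cycle iterator with islice skipping `indice` elements (quadratic total skipping) by direct modular indexing dataset[i % n], dataset[(i+1) % n], dataset[(i+2) % n] in a single comprehension.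
import Mathlib
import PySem

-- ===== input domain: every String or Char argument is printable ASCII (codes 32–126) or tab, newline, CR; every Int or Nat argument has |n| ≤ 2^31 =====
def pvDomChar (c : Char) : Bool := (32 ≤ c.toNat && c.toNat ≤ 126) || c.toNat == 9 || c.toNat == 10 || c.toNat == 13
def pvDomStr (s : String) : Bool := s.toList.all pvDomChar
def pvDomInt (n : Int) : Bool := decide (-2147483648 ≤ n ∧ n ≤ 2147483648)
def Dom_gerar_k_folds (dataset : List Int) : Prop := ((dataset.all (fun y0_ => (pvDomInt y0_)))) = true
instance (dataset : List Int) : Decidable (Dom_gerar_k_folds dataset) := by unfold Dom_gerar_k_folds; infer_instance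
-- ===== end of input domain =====

-- B replaces A's per-fold cycle-iterator simulation (islice skipping `indice`
-- elements each round, O(n^2)) by direct modular indexing per fold (O(n)).

-- ===== PORT A =====
-- One step of Python's `cycle(dataset)` iterator: `rem` is what is left of the
-- current pass; when exhausted, restart from `dataset`. (`dataset = []` never
-- occurs inside the loop, since then range(len(dataset)) is empty.)
def pvCycNext (ds rem : List Int) : Int × List Int :=
  match rem with
  | [] =>
    match ds with
    | [] => (0, [])
    | h :: t => (h, t)
  | h :: t => (h, t)

-- `islice(it, k, …)` consuming the first k elements of the cycle iterator
def pvCycDrop (ds : List Int) (rem : List Int) : Nat → List Int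
  | 0 => rem
  | k + 1 => pvCycDrop ds (pvCycNext ds rem).2 k

-- `list(islice(it, 0, k))`: take k elements, returning them and the iterator state
def pvCycTake (ds rem : List Int) : Nat → List Int × List Int
  | 0 => ([], rem)
  | k + 1 =>
    let s := pvCycNext ds rem
    let r := pvCycTake ds s.2 k
    (s.1 :: r.1, r.2)

def gerar_k_folds (dataset : List Int) : List (List (List Int)) :=
  let tamanho := dataset.length
  (List.range tamanho).foldl (fun folds indice =>
    -- dataset_em_ciclos = cycle(dataset)
    -- treinamento = list(islice(dataset_em_ciclos, indice, indice + 2))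
    let rem1 := pvCycDrop dataset dataset indice
    let tre := pvCycTake dataset rem1 2
    -- validacao = list(islice(dataset_em_ciclos, 0, 1))
    let val := pvCycTake dataset tre.2 1
    folds ++ [[tre.1, val.1]]) []

-- ===== PORT B =====
def gerar_k_folds_alt (dataset : List Int) : List (List (List Int)) :=
  let n := dataset.length
  (List.range n).map (fun i =>
    [[dataset.getD (i % n) 0, dataset.getD ((i + 1) % n) 0],
     [dataset.getD ((i + 2) % n) 0]])

-- ===== PRECONDITION & SPEC =====
def Spec_gerar_k_folds (dataset : List Int) (out : List (List (List Int))) : Prop := out = gerar_k_folds_alt dataset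
instance (dataset : List Int) (out : List (List (List Int))) : Decidable (Spec_gerar_k_folds dataset out) := by unfold Spec_gerar_k_folds; infer_instance

-- ===== CLAIM (what is proved, stated in full; the proofs are below) =====
def Claim_equal_gerar_k_folds : Prop := ∀ (dataset : List Int), Dom_gerar_k_folds dataset → Spec_gerar_k_folds dataset (gerar_k_folds dataset)

-- ===== LEMMAS AND PROOFS =====

-- the cycle iterator at position p (state `ds.drop p`, 0 ≤ p ≤ n) yields ds[p % n]
theorem pvCycNext_drop (ds : List Int) (p : Nat) (hne : ds ≠ []) (hle : p ≤ ds.length) :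
    pvCycNext ds (ds.drop p) = (ds.getD (p % ds.length) 0, ds.drop (p % ds.length + 1)) := by
  rcases Nat.lt_or_ge p ds.length with hlt | hge
  · rw [List.drop_eq_getElem_cons hlt, Nat.mod_eq_of_lt hlt]
    simp [pvCycNext, List.getD_eq_getElem?_getD, List.getElem?_eq_getElem hlt]
  · have hp : p = ds.length := le_antisymm hle hge
    subst hp
    cases ds with
    | nil => simp at hne
    | cons h t => simp [pvCycNext, List.getD]

theorem pvCycDrop_eq (ds : List Int) (i p : Nat) (h : p + i ≤ ds.length) :
    pvCycDrop ds (ds.drop p) i = ds.drop (p + i) := by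
  induction i generalizing p with
  | zero => simp [pvCycDrop]
  | succ k ih =>
    have hlt : p < ds.length := by omega
    have hne : ds ≠ [] := by
      intro hnil; rw [hnil] at hlt; simp at hlt
    rw [pvCycDrop, pvCycNext_drop ds p hne (le_of_lt hlt), Nat.mod_eq_of_lt hlt]
    have := ih (p + 1) (by omega)
    rw [this]
    ring_nf

theorem mod_succ_mod (a n : Nat) : (a % n + 1) % n = (a + 1) % n := by
  conv_rhs => rw [Nat.add_mod]
  rw [Nat.add_mod (a % n) 1, Nat.mod_mod_of_dvd _ (dvd_refl n)]

-- the body of A's loop at index i < n produces exactly B's fold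
theorem fold_body_eq (ds : List Int) (i : Nat) (hi : i < ds.length) :
    (let rem1 := pvCycDrop ds ds i
     let tre := pvCycTake ds rem1 2
     let val := pvCycTake ds tre.2 1
     [tre.1, val.1]) =
    [[ds.getD (i % ds.length) 0, ds.getD ((i + 1) % ds.length) 0],
     [ds.getD ((i + 2) % ds.length) 0]] := by
  have hne : ds ≠ [] := by
    intro hnil; rw [hnil] at hi; simp at hi
  have h0 : pvCycDrop ds ds i = ds.drop i := by
    have := pvCycDrop_eq ds i 0 (by omega)
    simpa using this
  have hmod_le : ∀ a : Nat, a % ds.length + 1 ≤ ds.length :=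
    fun a => Nat.mod_lt a (by omega)
  have s1 := pvCycNext_drop ds i hne (le_of_lt hi)
  have s2 := pvCycNext_drop ds (i % ds.length + 1) hne (hmod_le i)
  have s3 := pvCycNext_drop ds ((i % ds.length + 1) % ds.length + 1) hne
      (hmod_le (i % ds.length + 1))
  simp only [h0, pvCycTake, s1, s2, s3]
  rw [Nat.mod_eq_of_lt hi] at *
  simp [mod_succ_mod, Nat.add_assoc]

theorem foldl_append_map {α β : Type} (f : α → β) (l : List α) (acc : List β) :
    l.foldl (fun a x => a ++ [f x]) acc = acc ++ l.map f := by
  induction l generalizing acc with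
  | nil => simp
  | cons h t ih => simp [List.foldl, ih]

-- ===== VERDICT (by name: the statement is the Claim_ definition above) =====
theorem gerar_k_folds_spec : Claim_equal_gerar_k_folds := by
  intro dataset _
  unfold Spec_gerar_k_folds gerar_k_folds gerar_k_folds_alt
  rw [foldl_append_map
    (fun indice =>
      let rem1 := pvCycDrop dataset dataset indice
      let tre := pvCycTake dataset rem1 2
      let val := pvCycTake dataset tre.2 1
      [tre.1, val.1])]
  simp only [List.nil_append]
  apply List.map_congr_left
  intro i hi
  exact fold_body_eq dataset i (List.mem_range.mp hi)
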